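-- pv_equiv track=rewrite | github.com/hedone21/llm_rs2 | experiments/analysis/round_report.py | _classify_round
-- ===== SOURCE A (Python) =====
-- ROUND_PREFIXES = {
--     1: ["B-"],
--     2: ["T-", "C-", "E-", "M-", "R-"],
--     3: ["P-", "RP-"],
--     4: ["H-"],
--     5: ["X-"],
-- }
--
-- def _classify_round(filename):
--     """Determine which round a result file belongs to.
--
--     Checks longer prefixes first to avoid ambiguity (e.g., RP- vs R-).
--
--     Args:
--         filename: Just the filename (not full path).
--
--     Returns:
--         Integer round number, or 0 if unclassified.
--     """
--     basename = filename.replace(".jsonl", "")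
--
--     # Build a flat list of (prefix, round_num), sorted by prefix length descending
--     # so longer prefixes match first (e.g., RP- before R-)
--     all_prefixes = []
--     for round_num, prefixes in ROUND_PREFIXES.items():
--         for prefix in prefixes:
--             all_prefixes.append((prefix, round_num))
--     all_prefixes.sort(key=lambda x: len(x[0]), reverse=True)
--
--     for prefix, round_num in all_prefixes:
--         if basename.startswith(prefix):
--             return round_num
--
--     return 0
-- ===== SOURCE B (Python) =====
-- ROUND_PREFIXES = {
--     1: ["B-"],
--     2: ["T-", "C-", "E-", "M-", "R-"],
--     3: ["P-", "RP-"],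
--     4: ["H-"],
--     5: ["X-"],
-- }
--
-- # Flatten once: prefix -> round, plus the distinct prefix lengths, longest first.
-- _PREFIX_TO_ROUND = {p: r for r, ps in ROUND_PREFIXES.items() for p in ps}
-- _LENGTHS = sorted({len(p) for p in _PREFIX_TO_ROUND}, reverse=True)
--
--
-- def _classify_round(filename):
--     basename = filename.replace(".jsonl", "")
--     for length in _LENGTHS:
--         round_num = _PREFIX_TO_ROUND.get(basename[:length])
--         if round_num is not None:
--             return round_num
--     return 0
-- ===== Notes on version B (the rewrite author's own statement) =====
-- stated objective: idiomatic
-- what changed: Instead of rebuilding and length-sorting the full (prefix, round) list per call and scanning it with startswith, B flattens ROUND_PREFIXES once into a prefix->round dict and, per call, tries one dict lookup of basename[:L] for each distinct prefix length L from longest to shortest.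
import Mathlib
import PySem

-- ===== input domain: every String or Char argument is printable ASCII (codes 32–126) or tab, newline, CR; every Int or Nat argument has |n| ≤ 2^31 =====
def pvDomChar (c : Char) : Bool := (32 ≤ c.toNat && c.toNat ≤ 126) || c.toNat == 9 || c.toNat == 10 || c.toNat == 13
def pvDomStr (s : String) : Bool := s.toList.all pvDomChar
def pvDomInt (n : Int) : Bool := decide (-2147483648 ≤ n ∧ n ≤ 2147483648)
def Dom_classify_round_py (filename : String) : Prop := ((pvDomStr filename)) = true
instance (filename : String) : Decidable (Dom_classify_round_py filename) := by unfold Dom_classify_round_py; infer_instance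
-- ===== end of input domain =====

-- B replaces A's per-call build-and-length-sort of the prefix list scanned with startswith
-- by a prefix→round dict built once and one slice lookup per distinct prefix length (idiomatic).

-- ===== PORT A =====
-- ROUND_PREFIXES, shared module constant
def roundPrefixes : List (Int × List String) :=
  [(1, ["B-"]), (2, ["T-", "C-", "E-", "M-", "R-"]), (3, ["P-", "RP-"]), (4, ["H-"]), (5, ["X-"])]

-- 'for prefix, round_num in all_prefixes: if basename.startswith(prefix): return round_num / return 0'
def classifyLoopA (basename : String) : List (String × Int) → Int
  | [] => 0
  | (p, r) :: rest => if PySem.Str.startswith basename p then r else classifyLoopA basename rest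

def classify_round_py (filename : String) : Int :=
  let basename := PySem.Str.replace filename ".jsonl" ""
  let all_prefixes : List (String × Int) :=
    roundPrefixes.foldl (fun acc pr => pr.2.foldl (fun acc2 p => acc2 ++ [(p, pr.1)]) acc) []
  let sorted_prefixes := PySem.List.sorted all_prefixes (fun x => PySem.Str.len x.1) true
  classifyLoopA basename sorted_prefixes

-- ===== PORT B =====
-- _PREFIX_TO_ROUND = {p: r for r, ps in ROUND_PREFIXES.items() for p in ps}
def prefixToRound : PySem.Dict String Int :=
  PySem.Dict.ofList (roundPrefixes.flatMap (fun pr => pr.2.map (fun p => (p, pr.1))))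

-- _LENGTHS = sorted({len(p) for p in _PREFIX_TO_ROUND}, reverse=True)
def prefixLengths : List Int :=
  PySem.List.sorted (PySem.Set.ofList (prefixToRound.keys.map PySem.Str.len)) (fun x => x) true

-- 'for length in _LENGTHS: round_num = _PREFIX_TO_ROUND.get(basename[:length]); if round_num is not None: return round_num / return 0'
def classifyLoopB (basename : String) : List Int → Int
  | [] => 0
  | L :: rest =>
    match prefixToRound.get? (PySem.Str.slice basename none (some L)) with
    | some r => r
    | none => classifyLoopB basename rest

def classify_round_py_alt (filename : String) : Int :=
  classifyLoopB (PySem.Str.replace filename ".jsonl" "") prefixLengths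

-- ===== PRECONDITION & SPEC =====
def Spec_classify_round_py (filename : String) (out : Int) : Prop := out = classify_round_py_alt filename
instance (filename : String) (out : Int) : Decidable (Spec_classify_round_py filename out) := by unfold Spec_classify_round_py; infer_instance

-- ===== CLAIM (what is proved, stated in full; the proofs are below) =====
def Claim_equal_classify_round_py : Prop := ∀ (filename : String), Dom_classify_round_py filename → Spec_classify_round_py filename (classify_round_py filename)

-- ===== LEMMAS AND PROOFS =====

-- the nine length-2 prefixes in A's sorted order (identical to their dict order in B)
def keys2 : List (String × Int) :=
  [("B-", 1), ("T-", 2), ("C-", 2), ("E-", 2), ("M-", 2), ("R-", 2), ("P-", 3), ("H-", 4), ("X-", 5)]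

lemma dict_eval : prefixToRound = PySem.Dict.mk
    [("B-", 1), ("T-", 2), ("C-", 2), ("E-", 2), ("M-", 2), ("R-", 2), ("P-", 3), ("RP-", 3), ("H-", 4), ("X-", 5)] := by
  decide

lemma str_eq_of_toList {s t : String} (h : s.toList = t.toList) : s = t := String.toList_inj.mp h

lemma str_beq_false {s t : String} (h : s.toList = t.toList → False) : (s == t) = false := by
  rw [beq_eq_false_iff_ne]
  intro he
  exact h (by rw [he])

lemma key_beq (k s2 b : String) (h2 : s2.toList = b.toList.take 2) :
    (k == s2) = decide (k.toList = b.toList.take 2) := by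
  by_cases h : k.toList = b.toList.take 2
  · have hk : k = s2 := str_eq_of_toList (by rw [h2, h])
    simp [hk, h2]
  · rw [str_beq_false (fun he => h (by rw [he, h2]))]
    simp [h]

lemma startswith_take (b p : String) :
    PySem.Str.startswith b p = decide (p.toList = b.toList.take p.toList.length) := by
  have hb : PySem.Str.startswith b p = PySem.Chars.startswith b.toList p.toList := by
    simp [pysem]
  rw [hb]
  by_cases h : p.toList = b.toList.take p.toList.length
  · rw [(PySem.Chars.startswith_iff _ _).mpr (List.prefix_iff_eq_take.mpr h), decide_eq_true h]
  · rw [decide_eq_false h, Bool.eq_false_iff]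
    intro ht
    exact h (List.prefix_iff_eq_take.mp ((PySem.Chars.startswith_iff _ _).mp ht))

lemma slice2 (b : String) : (PySem.Str.slice b none (some (2 : Int))).toList = b.toList.take 2 := by
  simp [pysem, PySem.List.slice_to _ (by norm_num : (0 : Int) ≤ (2 : Int))]

lemma slice3 (b : String) : (PySem.Str.slice b none (some (3 : Int))).toList = b.toList.take 3 := by
  simp [pysem, PySem.List.slice_to _ (by norm_num : (0 : Int) ≤ (3 : Int))]

-- A's startswith chain over length-2 prefixes = the dict lookup keyed by the 2-slice
lemma getChain (b s2 : String) (h2 : s2.toList = b.toList.take 2)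
    (ks : List (String × Int)) (hks : ∀ p ∈ ks, p.1.toList.length = 2) :
    classifyLoopA b ks
      = (match (PySem.Dict.mk ks).get? s2 with | some r => r | none => (0 : Int)) := by
  induction ks with
  | nil => rfl
  | cons hd tl ih =>
    obtain ⟨k, r⟩ := hd
    have hk2 : k.toList.length = 2 := hks (k, r) List.mem_cons_self
    have htl : ∀ p ∈ tl, p.1.toList.length = 2 := fun p hp => hks p (List.mem_cons_of_mem _ hp)
    simp only [classifyLoopA, PySem.Dict.get?_mk_cons, startswith_take, key_beq k s2 b h2, hk2]
    by_cases h : k.toList = b.toList.take 2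
    · simp [h]
    · simp only [h, decide_false, Bool.false_eq_true, if_false]
      exact ih htl

lemma chain9 (b : String) : classifyLoopA b keys2 = classifyLoopB b [2] := by
  have h2 : (PySem.Str.slice b none (some (2 : Int))).toList = b.toList.take 2 := slice2 b
  have hRP : (("RP-" : String) == PySem.Str.slice b none (some (2 : Int))) = false := by
    apply str_beq_false
    intro h
    have hl := congrArg List.length h
    rw [h2, List.length_take] at hl
    have h3 : ("RP-" : String).toList.length = 3 := by decide
    omega
  have hd : prefixToRound.get? (PySem.Str.slice b none (some (2 : Int)))
      = (PySem.Dict.mk keys2).get? (PySem.Str.slice b none (some (2 : Int))) := by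
    rw [dict_eval]
    simp [PySem.Dict.get?_mk_cons, hRP, keys2]
  have hkeys : ∀ p ∈ keys2, p.1.toList.length = 2 := by decide
  rw [getChain b _ h2 keys2 hkeys]
  simp only [classifyLoopB, hd]

lemma main_eq (b : String) :
    classifyLoopA b (("RP-", 3) :: keys2) = classifyLoopB b [3, 2] := by
  have h3t : (PySem.Str.slice b none (some (3 : Int))).toList = b.toList.take 3 := slice3 b
  have eRP : ("RP-" : String).toList = ['R', 'P', '-'] := by decide
  have uA : classifyLoopA b (("RP-", 3) :: keys2)
      = if PySem.Str.startswith b "RP-" then (3 : Int) else classifyLoopA b keys2 := rfl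
  have uB : classifyLoopB b [3, 2]
      = (match prefixToRound.get? (PySem.Str.slice b none (some (3 : Int))) with
         | some r => r
         | none => classifyLoopB b [2]) := rfl
  by_cases h3 : b.toList.take 3 = ['R', 'P', '-']
  · have hs3 : PySem.Str.slice b none (some (3 : Int)) = "RP-" :=
      str_eq_of_toList (by rw [h3t, h3, eRP])
    have h3' : ['R', 'P', '-'] = b.toList.take 3 := h3.symm
    have hsw : PySem.Str.startswith b "RP-" = true := by
      rw [startswith_take, eRP]
      simp [h3']
    have hv : prefixToRound.get? "RP-" = some 3 := by rw [dict_eval]; decide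
    rw [uA, uB, hsw, if_pos rfl, hs3, hv]
  · have h3' : ¬ (['R', 'P', '-'] = b.toList.take 3) := fun h => h3 h.symm
    have hsw : PySem.Str.startswith b "RP-" = false := by
      rw [startswith_take, eRP]
      simp [h3']
    rw [uA, uB, hsw, if_neg (by simp)]
    by_cases hlen : 3 ≤ b.toList.length
    · have h3len : (PySem.Str.slice b none (some (3 : Int))).toList.length = 3 := by
        rw [h3t, List.length_take]
        omega
      have hkey : ∀ k : String, k.toList.length = 2 →
          (k == PySem.Str.slice b none (some (3 : Int))) = false := by
        intro k hk
        apply str_beq_false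
        intro h
        have hl := congrArg List.length h
        rw [h3len, hk] at hl
        omega
      have hRP3 : (("RP-" : String) == PySem.Str.slice b none (some (3 : Int))) = false := by
        apply str_beq_false
        intro h
        rw [h3t] at h
        exact h3 (by rw [← h, eRP])
      have hnone : prefixToRound.get? (PySem.Str.slice b none (some (3 : Int))) = none := by
        rw [dict_eval]
        simp only [PySem.Dict.get?_mk_cons, hRP3,
          hkey "B-" (by decide), hkey "T-" (by decide), hkey "C-" (by decide),
          hkey "E-" (by decide), hkey "M-" (by decide), hkey "R-" (by decide),
          hkey "P-" (by decide), hkey "H-" (by decide), hkey "X-" (by decide),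
          Bool.false_eq_true, if_false]
        rfl
      rw [hnone]
      exact chain9 b
    · have hshort : b.toList.length ≤ 2 := by omega
      have hs32 : PySem.Str.slice b none (some (3 : Int)) = PySem.Str.slice b none (some (2 : Int)) :=
        str_eq_of_toList (by
          rw [h3t, slice2 b, List.take_of_length_le (by omega), List.take_of_length_le hshort])
      have uB2 : classifyLoopB b [2]
          = (match prefixToRound.get? (PySem.Str.slice b none (some (2 : Int))) with
             | some r => r
             | none => classifyLoopB b []) := rfl
      rw [chain9 b, hs32]
      cases hget : prefixToRound.get? (PySem.Str.slice b none (some (2 : Int))) with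
      | some r => rw [uB2, hget]
      | none => rfl

-- ===== VERDICT (by name: the statement is the Claim_ definition above) =====
theorem classify_round_py_spec : Claim_equal_classify_round_py := by
  intro filename _
  unfold Spec_classify_round_py
  show classifyLoopA (PySem.Str.replace filename ".jsonl" "") (("RP-", 3) :: keys2)
      = classifyLoopB (PySem.Str.replace filename ".jsonl" "") [3, 2]
  exact main_eq _
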